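-- pv_equiv track=rewrite | github.com/ASSERT-KTH/Mokav | experiments/pynguin/c4b/single-return/generated_tests/src_2643/3/src_2643.py | func
-- ===== SOURCE A (Python) =====
-- def func(*args):
--
-- 	s = args[0]
-- 	num = 0
-- 	p = 0
-- 	for i in range((len(s) - 1)):
-- 	    if ((s[i] == 'V') and (s[(i + 1)] == 'K')):
-- 	        num += 1
-- 	    if (((i + 2) < len(s)) and (s[i] == 'V') and (s[(i + 1)] == 'V') and (s[(i + 2)] == 'V')):
-- 	        p = 1
-- 	    if (((i + 2) < len(s)) and (s[i] == 'K') and (s[(i + 1)] == 'K') and (s[(i + 2)] == 'K')):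
-- 	        p = 1
-- 	if ((len(s) > 1) and (s[(- 1)] == 'V') and (s[(- 2)] == 'V')):
-- 	    p = 1
-- 	if ((len(s) > 1) and (s[0] == 'K') and (s[1] == 'K')):
-- 	    p = 1
-- 	return((num + p))
-- ===== SOURCE B (Python) =====
-- def func(*args):
--     s = args[0]
--     num = s.count('VK')
--     p = 1 if ('VVV' in s or 'KKK' in s or s.endswith('VV') or s.startswith('KK')) else 0
--     return num + p
-- ===== Notes on version B (the rewrite author's own statement) =====
-- stated objective: faster
-- what changed: Replaces the fused per-character index loop with independent library substring scans: num = s.count('VK') (occurrences of VK cannot overlap, so it equals the pairwise count) and the flag from 'VVV' in s / 'KKK' in s / s.endswith('VV') / s.startswith('KK').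
import Mathlib
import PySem

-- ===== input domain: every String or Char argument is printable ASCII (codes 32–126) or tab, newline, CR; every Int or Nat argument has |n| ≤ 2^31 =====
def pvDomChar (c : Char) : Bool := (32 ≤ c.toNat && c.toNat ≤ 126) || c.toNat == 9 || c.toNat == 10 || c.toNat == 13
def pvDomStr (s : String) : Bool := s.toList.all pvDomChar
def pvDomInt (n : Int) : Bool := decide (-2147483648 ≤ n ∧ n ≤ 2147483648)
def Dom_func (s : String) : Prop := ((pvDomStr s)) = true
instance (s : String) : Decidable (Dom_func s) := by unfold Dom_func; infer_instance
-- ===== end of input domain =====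

-- B replaces A's fused index loop by independent library substring scans (count / in / endswith / startswith); same O(n), measurably faster by constant factor (C-level scans).

-- ===== PORT A =====
-- loop body of A's single for-loop, kept as a helper (state = (num, p))
def bodyA (cs : List Char) (n : Int) (st : Int × Int) (i : Int) : Int × Int :=
  let num := if PySem.List.pyGetD cs i ' ' = 'V' ∧ PySem.List.pyGetD cs (i + 1) ' ' = 'K' then st.1 + 1 else st.1
  let p := if i + 2 < n ∧ PySem.List.pyGetD cs i ' ' = 'V' ∧ PySem.List.pyGetD cs (i + 1) ' ' = 'V' ∧ PySem.List.pyGetD cs (i + 2) ' ' = 'V' then 1 else st.2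
  let p := if i + 2 < n ∧ PySem.List.pyGetD cs i ' ' = 'K' ∧ PySem.List.pyGetD cs (i + 1) ' ' = 'K' ∧ PySem.List.pyGetD cs (i + 2) ' ' = 'K' then 1 else p
  (num, p)

def func (s : String) : Int :=
  let cs := s.toList
  let n : Int := PySem.Str.len s
  let st := (PySem.List.pyRange 0 (n - 1) 1).foldl (bodyA cs n) (0, 0)
  let p := if 1 < n ∧ PySem.List.pyGetD cs (-1) ' ' = 'V' ∧ PySem.List.pyGetD cs (-2) ' ' = 'V' then 1 else st.2
  let p := if 1 < n ∧ PySem.List.pyGetD cs 0 ' ' = 'K' ∧ PySem.List.pyGetD cs 1 ' ' = 'K' then 1 else p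
  st.1 + p

-- ===== PORT B =====
def func_alt (s : String) : Int :=
  let num : Int := (PySem.Str.count s "VK" : Int)
  let p : Int := if PySem.Str.isIn "VVV" s || PySem.Str.isIn "KKK" s ||
                    PySem.Str.endswith s "VV" || PySem.Str.startswith s "KK" then 1 else 0
  num + p

-- ===== PRECONDITION & SPEC =====
def Spec_func (s : String) (out : Int) : Prop := out = func_alt s
instance (s : String) (out : Int) : Decidable (Spec_func s out) := by unfold Spec_func; infer_instance

-- ===== CLAIM (what is proved, stated in full; the proofs are below) =====
def Claim_equal_func : Prop := ∀ (s : String), Dom_func s → Spec_func s (func s)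

-- ===== LEMMAS AND PROOFS =====

def pairsVK : List Char → Nat
  | a :: b :: t => (if a = 'V' ∧ b = 'K' then 1 else 0) + pairsVK (b :: t)
  | _ => 0

lemma pairsVK_tail (a : Char) (t : List Char) (h : ¬ (a = 'V' ∧ t.headD ' ' = 'K') ∨ t = []) :
    pairsVK (a :: t) = pairsVK t := by
  cases t with
  | nil => simp [pairsVK]
  | cons b u =>
    rcases h with h | h
    · simp only [pairsVK]
      rw [if_neg]; · omega
      simpa using h
    · simp at h

lemma count_go_eq (fuel : Nat) : ∀ (l : List Char) (acc : Nat), l.length ≤ fuel →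
    PySem.Chars.count.go ['V', 'K'] fuel l acc = acc + pairsVK l := by
  induction fuel with
  | zero =>
    intro l acc h
    have : l = [] := List.eq_nil_of_length_eq_zero (by omega)
    subst this; simp [PySem.Chars.count.go, pairsVK]
  | succ fuel ih =>
    intro l acc h
    cases l with
    | nil => simp [PySem.Chars.count.go, pairsVK]
    | cons a t =>
      rw [PySem.Chars.count.go]
      by_cases hp : List.isPrefixOf ['V','K'] (a :: t) = true
      · rw [if_pos hp]
        obtain ⟨u, hu⟩ : ∃ u, a :: t = 'V' :: 'K' :: u := by
          cases t with
          | nil => simp [List.isPrefixOf] at hp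
          | cons b u =>
            simp [List.isPrefixOf] at hp
            exact ⟨u, by simp [← hp.1, ← hp.2]⟩
        cases hu
        simp only [List.length_cons] at h
        rw [ih _ _ (by simp at h ⊢; omega)]
        simp [pairsVK]
        rw [pairsVK_tail 'K' u (Or.inl (by simp))]
        ring
      · rw [if_neg hp]
        simp only [List.length_cons] at h
        rw [ih t acc (by omega)]
        rw [pairsVK_tail]
        cases t with
        | nil => right; rfl
        | cons b u =>
          left
          simp [List.isPrefixOf] at hp
          simp
          intro ha
          exact fun hb => hp ha.symm (by simp [hb])

lemma countVK_eq (cs : List Char) : PySem.Chars.count cs ['V', 'K'] = pairsVK cs := by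
  rw [PySem.Chars.count]
  rw [if_neg (by simp)]
  simpa using count_go_eq cs.length cs 0 le_rfl

def tripleVK : List Char → Bool
  | a :: b :: c :: t =>
      (decide ((a = 'V' ∧ b = 'V' ∧ c = 'V') ∨ (a = 'K' ∧ b = 'K' ∧ c = 'K'))) || tripleVK (b :: c :: t)
  | _ => false

lemma tripleVK_iff (cs : List Char) :
    tripleVK cs = true ↔ (['V','V','V'] <:+: cs ∨ ['K','K','K'] <:+: cs) := by
  induction cs using tripleVK.induct with
  | case1 a b c t ih =>
    rw [tripleVK]
    constructor
    · intro hf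
      rcases Bool.or_eq_true_iff.mp hf with hd | ht
      · rcases of_decide_eq_true hd with ⟨h1, h2, h3⟩ | ⟨h1, h2, h3⟩
        · exact Or.inl ⟨[], t, by simp [h1, h2, h3]⟩
        · exact Or.inr ⟨[], t, by simp [h1, h2, h3]⟩
      · rcases ih.mp ht with h | h
        · exact Or.inl (List.infix_cons h)
        · exact Or.inr (List.infix_cons h)
    · intro h
      apply Bool.or_eq_true_iff.mpr
      rcases h with h | h <;> rcases List.infix_cons_iff.mp h with hp | hi
      · exact Or.inl (by simp [List.cons_prefix_cons] at hp; simp [← hp.1, ← hp.2.1, ← hp.2.2])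
      · exact Or.inr (ih.mpr (Or.inl hi))
      · exact Or.inl (by simp [List.cons_prefix_cons] at hp; simp [← hp.1, ← hp.2.1, ← hp.2.2])
      · exact Or.inr (ih.mpr (Or.inr hi))
  | case2 x h =>
    rcases x with _ | ⟨a, _ | ⟨b, _ | ⟨c, t⟩⟩⟩
    · simp [tripleVK]
    · simp [tripleVK]
      exact ⟨fun hi => absurd hi.length_le (by simp), fun hi => absurd hi.length_le (by simp)⟩
    · simp [tripleVK]
      exact ⟨fun hi => absurd hi.length_le (by simp), fun hi => absurd hi.length_le (by simp)⟩
    · exact (h a b c t rfl).elim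

lemma pyGetD_shift (a : Char) (u : List Char) (d : Char) (j : Nat) :
    PySem.List.pyGetD (a :: u) ((j : Int) + 1) d = PySem.List.pyGetD u (j : Int) d := by
  rw [show (j : Int) + 1 = ((j + 1 : Nat) : Int) by push_cast; ring,
    PySem.List.pyGetD_natCast, PySem.List.pyGetD_natCast]
  rfl

lemma pyGetD_shift1 (a : Char) (u : List Char) (d : Char) (j : Nat) :
    PySem.List.pyGetD (a :: u) ((j : Int) + 1 + 1) d = PySem.List.pyGetD u ((j : Int) + 1) d := by
  rw [show (j : Int) + 1 + 1 = ((j + 1 : Nat) : Int) + 1 by push_cast; ring,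
    pyGetD_shift a u d (j + 1)]
  push_cast; ring_nf

lemma pyGetD_shift2 (a : Char) (u : List Char) (d : Char) (j : Nat) :
    PySem.List.pyGetD (a :: u) ((j : Int) + 1 + 2) d = PySem.List.pyGetD u ((j : Int) + 2) d := by
  rw [show (j : Int) + 1 + 2 = ((j + 2 : Nat) : Int) + 1 by push_cast; ring,
    pyGetD_shift a u d (j + 2)]
  push_cast; ring_nf

lemma bodyA_shift (a : Char) (u : List Char) (n : Int) (st : Int × Int) (k : Nat) :
    bodyA (a :: u) n st ((k : Int) + 1) = bodyA u (n - 1) st (k : Int) := by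
  unfold bodyA
  have hc : ((k : Int) + 1 + 2 < n) = ((k : Int) + 2 < n - 1) := propext (by omega)
  simp only [hc, pyGetD_shift, pyGetD_shift1, pyGetD_shift2]

lemma loopA_eq (cs : List Char) : ∀ (num p : Int),
    (PySem.List.pyRange 0 ((cs.length : Int) - 1) 1).foldl (bodyA cs (cs.length : Int)) (num, p)
      = (num + (pairsVK cs : Int), if tripleVK cs then 1 else p) := by
  induction cs using pairsVK.induct with
  | case2 x h =>
    rcases x with _ | ⟨a, _ | ⟨b, t⟩⟩
    · intro num p
      simp [PySem.List.pyRange_one_eq_nil, pairsVK, tripleVK]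
    · intro num p
      simp [PySem.List.pyRange_one_eq_nil, pairsVK, tripleVK]
    · exact (h a b t rfl).elim
  | case1 a b t ih =>
    intro num p
    have hn : ((a :: b :: t).length : Int) = (t.length : Int) + 2 := by simp; ring
    set m := t.length with hm
    set st1 := bodyA (a :: b :: t) ((m : Int) + 2) (num, p) 0 with hst1
    have lhs_eq :
        (PySem.List.pyRange 0 (((a :: b :: t).length : Int) - 1) 1).foldl
            (bodyA (a :: b :: t) ((a :: b :: t).length : Int)) (num, p)
          = (List.range m).foldl (fun (st : Int × Int) (k : Nat) => bodyA (b :: t) ((m : Int) + 1) st (k : Int)) st1 := by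
      rw [hn, PySem.List.pyRange_one_cons (by omega), List.foldl_cons, PySem.List.pyRange_one]
      rw [show (((m : Int) + 2 - 1) - (0 + 1)).toNat = m by omega]
      rw [List.foldl_map]
      apply PySem.List.foldl_congr_mem
      intro st' k _
      rw [show (0 : Int) + 1 + (k : Int) = (k : Int) + 1 by ring]
      rw [bodyA_shift a (b :: t) ((m : Int) + 2) st' k]
      rw [show (m : Int) + 2 - 1 = (m : Int) + 1 by ring]
    have rhs_eq :
        (PySem.List.pyRange 0 (((b :: t).length : Int) - 1) 1).foldl
            (bodyA (b :: t) ((b :: t).length : Int)) st1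
          = (List.range m).foldl (fun (st : Int × Int) (k : Nat) => bodyA (b :: t) ((m : Int) + 1) st (k : Int)) st1 := by
      rw [show (((b :: t).length : Int)) = (m : Int) + 1 by simp [hm]]
      rw [PySem.List.pyRange_one]
      rw [show (((m : Int) + 1 - 1) - 0).toNat = m by omega]
      rw [List.foldl_map]
      apply PySem.List.foldl_congr_mem
      intro st' k _
      rw [show (0 : Int) + (k : Int) = (k : Int) by ring]
    have key := ih st1.1 st1.2
    rw [rhs_eq] at key
    rw [lhs_eq, key]
    -- now compute st1 and compare
    have g0 : PySem.List.pyGetD (a :: b :: t) (0 : Int) ' ' = a := PySem.List.pyGetD_zero_cons _ _ _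
    have g1 : PySem.List.pyGetD (a :: b :: t) ((0 : Int) + 1) ' ' = b := by
      rw [show ((0 : Int) + 1) = ((1 : Nat) : Int) by norm_num, PySem.List.pyGetD_natCast]; rfl
    cases t with
    | nil =>
      have hcond : ¬ ((0 : Int) + 2 < (m : Int) + 2) := by simp [hm]
      rw [hst1]
      unfold bodyA
      simp only [g0, g1, hcond, false_and, if_false]
      simp only [pairsVK, tripleVK, Prod.mk.injEq]
      constructor
      · split_ifs <;> push_cast <;> ring
      · rfl
    | cons c u =>
      have g2 : PySem.List.pyGetD (a :: b :: c :: u) ((0 : Int) + 2) ' ' = c := by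
        rw [show ((0 : Int) + 2) = ((2 : Nat) : Int) by norm_num, PySem.List.pyGetD_natCast]; rfl
      have hcond : ((0 : Int) + 2 < (m : Int) + 2) := by simp [hm]
      rw [hst1]
      unfold bodyA
      simp only [g0, g1, g2, hcond, true_and]
      simp only [pairsVK, tripleVK, Prod.mk.injEq]
      constructor
      · split_ifs <;> push_cast <;> ring
      · by_cases h3 : tripleVK (b :: c :: u) = true
        · simp [h3]
        · simp only [Bool.not_eq_true] at h3
          simp only [h3, Bool.or_false]
          split_ifs with h4 h5 h6 <;> simp_all <;> tauto

lemma exists_two_suffix (cs : List Char) (h : 2 ≤ cs.length) :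
    ∃ pre x y, cs = pre ++ [x, y] := by
  rcases hr : cs.reverse with _ | ⟨y, _ | ⟨x, r⟩⟩
  · simp [List.reverse_eq_nil_iff] at hr; simp [hr] at h
  · have : cs = [y] := by
      have := congrArg List.reverse hr; simpa using this
    simp [this] at h
  · refine ⟨r.reverse, x, y, ?_⟩
    have := congrArg List.reverse hr
    simpa using this

lemma pyGetD_neg_two_append (xs : List Char) (x y d : Char) :
    PySem.List.pyGetD (xs ++ [x, y]) (-2) d = x := by
  rw [PySem.List.pyGetD_neg_ofNat _ 2 d (by omega) (by simp)]
  have h : (xs ++ [x, y]).length - 2 = xs.length := by simp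
  simp_rw [h]
  rw [List.getElem_append_right (by omega)]
  simp

lemma endsVV_iff (cs : List Char) :
    ((1 : Int) < (cs.length : Int) ∧ PySem.List.pyGetD cs (-1) ' ' = 'V' ∧
        PySem.List.pyGetD cs (-2) ' ' = 'V')
      ↔ ['V','V'] <:+ cs := by
  constructor
  · rintro ⟨h1, h2, h3⟩
    obtain ⟨pre, x, y, rfl⟩ := exists_two_suffix cs (by omega)
    rw [pyGetD_neg_two_append] at h3
    rw [show pre ++ [x, y] = (pre ++ [x]) ++ [y] by simp] at h2
    rw [PySem.List.pyGetD_neg_one_append_singleton] at h2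
    subst h2; subst h3
    exact ⟨pre, by simp⟩
  · rintro ⟨q, rfl⟩
    refine ⟨by simp; omega, ?_, ?_⟩
    · rw [show q ++ ['V','V'] = (q ++ ['V']) ++ ['V'] by simp,
        PySem.List.pyGetD_neg_one_append_singleton]
    · exact pyGetD_neg_two_append q 'V' 'V' ' '

lemma startsKK_iff (cs : List Char) :
    ((1 : Int) < (cs.length : Int) ∧ PySem.List.pyGetD cs 0 ' ' = 'K' ∧
        PySem.List.pyGetD cs 1 ' ' = 'K')
      ↔ ['K','K'] <+: cs := by
  rcases cs with _ | ⟨x, _ | ⟨y, t⟩⟩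
  · simp
  · constructor
    · rintro ⟨h1, -⟩; simp at h1
    · intro h; exact absurd h.length_le (by simp)
  · have g1 : PySem.List.pyGetD (x :: y :: t) (1 : Int) ' ' = y := by
      rw [show (1 : Int) = ((1 : Nat) : Int) by norm_num, PySem.List.pyGetD_natCast]; rfl
    rw [PySem.List.pyGetD_zero_cons, g1]
    constructor
    · rintro ⟨-, rfl, rfl⟩
      exact List.cons_prefix_cons.mpr ⟨rfl, List.cons_prefix_cons.mpr ⟨rfl, List.nil_prefix⟩⟩
    · intro h
      rcases List.cons_prefix_cons.mp h with ⟨hx, h'⟩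
      rcases List.cons_prefix_cons.mp h' with ⟨hy, -⟩
      exact ⟨by simp, hx.symm, hy.symm⟩

theorem func_spec_aux (s : String) : func s = func_alt s := by
  unfold func func_alt
  simp only [PySem.Str.len_eq, PySem.Str.count_eq]
  rw [loopA_eq s.toList 0 0]
  have hVK : ("VK").toList = ['V','K'] := rfl
  rw [hVK, countVK_eq]
  simp only [zero_add]
  congr 1
  have hcond :
      (PySem.Str.isIn "VVV" s || PySem.Str.isIn "KKK" s ||
        PySem.Str.endswith s "VV" || PySem.Str.startswith s "KK") = true
        ↔ (tripleVK s.toList = true ∨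
            ((1 : Int) < (s.toList.length : Int) ∧ PySem.List.pyGetD s.toList (-1) ' ' = 'V' ∧
              PySem.List.pyGetD s.toList (-2) ' ' = 'V') ∨
            ((1 : Int) < (s.toList.length : Int) ∧ PySem.List.pyGetD s.toList 0 ' ' = 'K' ∧
              PySem.List.pyGetD s.toList 1 ' ' = 'K')) := by
    simp only [Bool.or_eq_true, PySem.Str.isIn_iff_infix, PySem.Str.endswith_eq,
      PySem.Str.startswith_eq, PySem.Chars.endswith_iff, PySem.Chars.startswith_iff]
    rw [tripleVK_iff, endsVV_iff, startsKK_iff]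
    show _ ↔ _
    constructor
    · rintro (((h | h) | h) | h) <;> tauto
    · rintro (h | h | h)
      · rcases h with h | h
        · exact Or.inl (Or.inl (Or.inl h))
        · exact Or.inl (Or.inl (Or.inr h))
      · exact Or.inl (Or.inr h)
      · exact Or.inr h
  by_cases hB : (PySem.Str.isIn "VVV" s || PySem.Str.isIn "KKK" s ||
      PySem.Str.endswith s "VV" || PySem.Str.startswith s "KK") = true
  · rw [if_pos hB]
    rcases hcond.mp hB with h | h | h
    · split_ifs <;> simp_all
    · split_ifs <;> simp_all
    · split_ifs <;> simp_all
  · rw [if_neg hB]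
    have hT := fun h' => hB (hcond.mpr (Or.inl h'))
    have hE := fun h' => hB (hcond.mpr (Or.inr (Or.inl h')))
    have hS := fun h' => hB (hcond.mpr (Or.inr (Or.inr h')))
    rw [if_neg hS, if_neg hE, if_neg (by simpa using hT)]

-- ===== VERDICT (by name: the statement is the Claim_ definition above) =====
theorem func_spec : Claim_equal_func := by
  intro s _
  unfold Spec_func
  exact func_spec_aux s
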